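-- pv_equiv track=rewrite | github.com/Parkjinman/Programers-Algorithm-Team | 장혜선/20201017_예산.py | solution
-- ===== SOURCE A (Python) =====
-- def solution(d, budget):
--     # sort d
--     d.sort()
--     answer = 0
--
--     # if nothing in d
--     if len(d) == 0 :
--         return 0
--
--     for item in d :
--         budget -= item
--         if budget >=0 :
--             answer += 1
--         else :
--             return answer
--
--     return answer
-- ===== SOURCE B (Python) =====
-- def solution(d, budget):
--     d.sort()  # same in-place sort as A; equivalence is about the return value
--
--     # Divide and conquer: count of items bought from xs with budget b,
--     # stopping at the first item that overflows the running budget.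
--     def go(xs, b):
--         if not xs:
--             return 0
--         if len(xs) == 1:
--             return 1 if xs[0] <= b else 0
--         mid = len(xs) // 2
--         left, right = xs[:mid], xs[mid:]
--         c = go(left, b)
--         if c < mid:          # stopped inside the left half
--             return c
--         return mid + go(right, b - sum(left))
--
--     return go(d, budget)
-- ===== Notes on version B (the rewrite author's own statement) =====
-- stated objective: alternative
-- what changed: Replaces A's linear subtract-and-early-return loop with a divide-and-conquer recursion: count in the left half, and only if the left half was fully bought, recurse into the right half with the budget reduced by the left half's sum.
import Mathlib
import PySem

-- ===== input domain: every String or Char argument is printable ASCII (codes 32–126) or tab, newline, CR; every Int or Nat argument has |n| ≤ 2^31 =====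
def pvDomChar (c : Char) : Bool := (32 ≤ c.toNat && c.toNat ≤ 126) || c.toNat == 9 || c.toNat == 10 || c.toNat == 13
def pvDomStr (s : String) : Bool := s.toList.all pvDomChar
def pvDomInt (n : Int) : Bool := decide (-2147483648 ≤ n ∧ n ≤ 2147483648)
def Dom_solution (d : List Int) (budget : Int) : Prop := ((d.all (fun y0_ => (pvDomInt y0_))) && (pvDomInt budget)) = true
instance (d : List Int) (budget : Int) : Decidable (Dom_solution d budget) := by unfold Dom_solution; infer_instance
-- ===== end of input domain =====

-- B replaces A's linear subtract-and-early-return loop with a divide-and-conquer recursion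
-- over halves of the sorted list (alternative decomposition, same cost).
-- Both A and B sort d in place in Python; the equivalence proved here is about the return value.

-- ===== PORT A =====
-- the for-loop with early return: state (budget, answer)
def solLoopA : List Int → Int → Int → Int
  | [], _, answer => answer
  | item :: rest, budget, answer =>
    if budget - item ≥ 0 then solLoopA rest (budget - item) (answer + 1) else answer

def solution (d : List Int) (budget : Int) : Int :=
  let ds := PySem.List.sorted d (fun x => x) false
  if ds.length = 0 then 0 else solLoopA ds budget 0

-- ===== PORT B =====
-- go(xs, b): divide-and-conquer count, stopping at the first overflowing item
def solGoB (xs : List Int) (b : Int) : Int :=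
  match xs with
  | [] => 0
  | [x] => if x ≤ b then 1 else 0
  | x :: y :: rest =>
    let l := x :: y :: rest
    let mid := l.length / 2
    let c := solGoB (l.take mid) b
    if c < (mid : Int) then c else (mid : Int) + solGoB (l.drop mid) (b - (l.take mid).sum)
termination_by xs.length
decreasing_by
  · exact Nat.lt_of_le_of_lt (List.length_take_le _ _)
      (Nat.div_lt_self (Nat.succ_pos _) Nat.one_lt_two)
  · rw [List.length_drop]
    exact Nat.sub_lt (Nat.succ_pos _)
      (Nat.div_pos (Nat.le_add_left 2 rest.length) Nat.zero_lt_two)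

def solution_alt (d : List Int) (budget : Int) : Int :=
  solGoB (PySem.List.sorted d (fun x => x) false) budget

-- ===== PRECONDITION & SPEC =====
def Spec_solution (d : List Int) (budget : Int) (out : Int) : Prop := out = solution_alt d budget
instance (d : List Int) (budget : Int) (out : Int) : Decidable (Spec_solution d budget out) := by unfold Spec_solution; infer_instance

-- ===== CLAIM (what is proved, stated in full; the proofs are below) =====
def Claim_equal_solution : Prop := ∀ (d : List Int) (budget : Int), Dom_solution d budget → Spec_solution d budget (solution d budget)

-- ===== LEMMAS AND PROOFS =====
theorem solLoopA_acc : ∀ (xs : List Int) (b ans : Int),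
    solLoopA xs b ans = ans + solLoopA xs b 0 := by
  intro xs
  induction xs with
  | nil => intro b ans; simp [solLoopA]
  | cons x rest ih =>
    intro b ans
    simp only [solLoopA]
    by_cases h : b - x ≥ 0
    · rw [if_pos h, if_pos h, ih (b - x) (ans + 1), ih (b - x) (0 + 1)]; ring
    · rw [if_neg h, if_neg h]; ring

theorem solLoopA_bounds : ∀ (xs : List Int) (b : Int),
    0 ≤ solLoopA xs b 0 ∧ solLoopA xs b 0 ≤ (xs.length : Int) := by
  intro xs
  induction xs with
  | nil => intro b; simp [solLoopA]
  | cons x rest ih =>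
    intro b
    simp only [solLoopA, List.length_cons]
    by_cases h : b - x ≥ 0
    · rw [if_pos h, solLoopA_acc]
      have := ih (b - x)
      push_cast
      omega
    · rw [if_neg h]
      exact ⟨le_refl _, by positivity⟩

theorem solLoopA_append : ∀ (xs ys : List Int) (b : Int),
    solLoopA (xs ++ ys) b 0 =
      if solLoopA xs b 0 < (xs.length : Int) then solLoopA xs b 0
      else (xs.length : Int) + solLoopA ys (b - xs.sum) 0 := by
  intro xs
  induction xs with
  | nil => intro ys b; simp [solLoopA]
  | cons x rest ih =>
    intro ys b
    simp only [List.cons_append, solLoopA, List.length_cons, List.sum_cons]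
    by_cases h : b - x ≥ 0
    · rw [if_pos h, if_pos h,
        solLoopA_acc (rest ++ ys) (b - x) (0 + 1), solLoopA_acc rest (b - x) (0 + 1),
        ih ys (b - x)]
      have hb := solLoopA_bounds rest (b - x)
      by_cases hlt : solLoopA rest (b - x) 0 < (rest.length : Int)
      · rw [if_pos hlt, if_pos (by push_cast; omega)]
      · rw [if_neg hlt, if_neg (by push_cast; omega)]
        have hbb : b - x - rest.sum = b - (x + rest.sum) := by ring
        rw [hbb]
        push_cast
        ring
    · rw [if_neg h, if_neg h, if_pos (by push_cast; omega)]

theorem solGoB_eq_aux : ∀ (n : Nat) (xs : List Int), xs.length ≤ n →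
    ∀ b, solGoB xs b = solLoopA xs b 0 := by
  intro n
  induction n with
  | zero =>
    intro xs hlen b
    have : xs = [] := List.eq_nil_of_length_eq_zero (Nat.le_zero.mp hlen)
    subst this
    simp [solGoB, solLoopA]
  | succ n ih =>
    intro xs hlen b
    match xs with
    | [] => simp [solGoB, solLoopA]
    | [x] =>
      rw [solGoB]
      simp only [solLoopA]
      by_cases h : x ≤ b
      · rw [if_pos h, if_pos (by omega : b - x ≥ 0)]; norm_num [solLoopA]
      · rw [if_neg h, if_neg (by omega : ¬ b - x ≥ 0)]
    | x :: y :: rest =>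
      rw [solGoB]
      have hmid1 : 0 < (x :: y :: rest).length / 2 :=
        Nat.div_pos (by simp) Nat.zero_lt_two
      have hmidlt : (x :: y :: rest).length / 2 < (x :: y :: rest).length :=
        Nat.div_lt_self (Nat.succ_pos _) Nat.one_lt_two
      -- abstract the midpoint so no divisions reach the arithmetic reasoning below
      generalize hm : (x :: y :: rest).length / 2 = mid at hmid1 hmidlt
      have htlen : ((x :: y :: rest).take mid).length = mid := by
        rw [List.length_take]; exact Nat.min_eq_left hmidlt.le
      have hdlen : ((x :: y :: rest).drop mid).length = (x :: y :: rest).length - mid :=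
        List.length_drop ..
      have hlen' : (x :: y :: rest).length ≤ n + 1 := hlen
      rw [ih ((x :: y :: rest).take mid) (by omega) b,
          ih ((x :: y :: rest).drop mid) (by omega)]
      have hsplit := solLoopA_append ((x :: y :: rest).take mid) ((x :: y :: rest).drop mid) b
      rw [List.take_append_drop, htlen] at hsplit
      rw [hsplit]

theorem solGoB_eq (xs : List Int) (b : Int) : solGoB xs b = solLoopA xs b 0 :=
  solGoB_eq_aux xs.length xs (le_refl _) b

-- ===== VERDICT (by name: the statement is the Claim_ definition above) =====
theorem solution_spec : Claim_equal_solution := by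
  intro d budget _
  unfold Spec_solution solution solution_alt
  cases hds : PySem.List.sorted d (fun x => x) false with
  | nil => simp [solGoB]
  | cons y ys =>
    rw [if_neg (by simp), solGoB_eq]
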